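-- pv_equiv track=rewrite | github.com/prosa-ai-id/faktaiklim-nlp | be_insertion_scripts/subtopic_multilabel_v2.py | get_label_distribution
-- ===== SOURCE A (Python) =====
-- def get_label_distribution(labels, all_category):
--     distribution = {k: 0 for k in all_category}
--     distribution["unknown"] = 0  # Add 'unknown' category
--     for label in labels:
--         if sum(label) == 0:
--             distribution["unknown"] += 1
--         else:
--             for i, value in enumerate(label):
--                 if value == 1:
--                     distribution[all_category[i]] += 1
--     distribution = dict(sorted(distribution.items()))
--     return distribution
-- ===== SOURCE B (Python) =====
-- def get_label_distribution(labels, all_category):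
--     rows = [l for l in labels if sum(l) != 0]
--     col = {}
--     for l in rows:
--         for i, v in enumerate(l):
--             if v == 1:
--                 col[i] = col.get(i, 0) + 1
--     dist = {c: 0 for c in all_category}
--     dist["unknown"] = sum(1 for l in labels if sum(l) == 0)
--     for i, cat in enumerate(all_category):
--         dist[cat] += col.get(i, 0)
--     return dict(sorted(dist.items()))
-- ===== Notes on version B (the rewrite author's own statement) =====
-- stated objective: alternative
-- what changed: Replaces A's row-by-row scan (per-row branch plus inner enumerate loop updating the dict) by a transpose-style pass: count the zero-sum rows once for 'unknown', then compute each category's count column-wise over the non-zero rows.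
import Mathlib
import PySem

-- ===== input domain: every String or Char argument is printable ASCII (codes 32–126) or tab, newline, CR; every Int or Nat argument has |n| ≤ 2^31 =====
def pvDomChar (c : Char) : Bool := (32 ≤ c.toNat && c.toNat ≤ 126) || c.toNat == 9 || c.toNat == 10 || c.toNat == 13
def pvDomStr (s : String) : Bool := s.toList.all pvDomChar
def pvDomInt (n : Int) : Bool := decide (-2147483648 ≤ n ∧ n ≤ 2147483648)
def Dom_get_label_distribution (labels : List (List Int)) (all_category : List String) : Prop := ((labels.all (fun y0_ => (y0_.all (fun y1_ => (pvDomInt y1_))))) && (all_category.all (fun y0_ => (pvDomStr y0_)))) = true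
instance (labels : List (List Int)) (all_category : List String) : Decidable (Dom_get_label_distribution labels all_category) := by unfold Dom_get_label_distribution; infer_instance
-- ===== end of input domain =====

-- B replaces A's row-by-row scan (per-row branch + inner enumerate loop) by a transpose-style
-- column pass: unknown counted once, then each category's count computed column-wise over the
-- non-unknown rows; objective: alternative decomposition, same asymptotic cost.

-- ===== PORT A =====
-- one iteration of A's `for label in labels` loop
-- (`distribution[...] += 1` always finds its key — every all_category element and "unknown"
--  are keys — so Dict.getD is exact; `all_category[i]` is in range on Pre_, where pyGetD "" is exact)
def pvRowStep (all_category : List String) (d : PySem.Dict String Int) (label : List Int) : PySem.Dict String Int :=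
  if label.sum == 0 then
    d.insert "unknown" (d.getD "unknown" 0 + 1)
  else
    (PySem.List.enumerate label).foldl (fun d p =>
      if p.2 == 1 then
        d.insert (PySem.List.pyGetD all_category p.1 "")
          (d.getD (PySem.List.pyGetD all_category p.1 "") 0 + 1)
      else d) d

def get_label_distribution (labels : List (List Int)) (all_category : List String) : List (String × Int) :=
  let d0 : PySem.Dict String Int := all_category.foldl (fun d k => d.insert k 0) PySem.Dict.empty
  let d1 := d0.insert "unknown" 0
  let d2 := labels.foldl (pvRowStep all_category) d1
  PySem.List.sorted2 d2.items (fun q => q.1) (fun q => q.2)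

-- ===== PORT B =====
def get_label_distribution_alt (labels : List (List Int)) (all_category : List String) : List (String × Int) :=
  let rows := labels.filter (fun l => !(l.sum == 0))
  let col : PySem.Dict Int Int := rows.foldl (fun d l => (PySem.List.enumerate l).foldl
      (fun d p => if p.2 == 1 then d.insert p.1 (d.getD p.1 0 + 1) else d) d) PySem.Dict.empty
  let d0 : PySem.Dict String Int := all_category.foldl (fun d c => d.insert c 0) PySem.Dict.empty
  let d1 := d0.insert "unknown" (((labels.filter (fun l => l.sum == 0)).length : Int))
  let d2 := (PySem.List.enumerate all_category).foldl
    (fun d p => d.insert p.2 (d.getD p.2 0 + col.getD p.1 0)) d1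
  PySem.List.sorted2 d2.items (fun q => q.1) (fun q => q.2)

-- ===== PRECONDITION & SPEC =====
-- Pre_ excludes exactly the inputs where A raises IndexError: a label with non-zero sum
-- holding the value 1 at an index ≥ len(all_category).
def Pre_get_label_distribution (labels : List (List Int)) (all_category : List String) : Prop :=
  ∀ l ∈ labels, l.sum ≠ 0 → ∀ i : Nat, i < l.length → l.getD i 0 = 1 → i < all_category.length
instance (labels : List (List Int)) (all_category : List String) : Decidable (Pre_get_label_distribution labels all_category) := by unfold Pre_get_label_distribution; infer_instance

def pvWitness_get_label_distribution : List (List Int) × List String := ([[1, 0], [0, 0], [0, 1]], ["a", "b"])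

def Spec_get_label_distribution (labels : List (List Int)) (all_category : List String) (out : List (String × Int)) : Prop := out = get_label_distribution_alt labels all_category
instance (labels : List (List Int)) (all_category : List String) (out : List (String × Int)) : Decidable (Spec_get_label_distribution labels all_category out) := by unfold Spec_get_label_distribution; infer_instance

-- ===== CLAIM (what is proved, stated in full; the proofs are below) =====
def Claim_equal_get_label_distribution : Prop := ∀ (labels : List (List Int)) (all_category : List String), Dom_get_label_distribution labels all_category → Pre_get_label_distribution labels all_category → Spec_get_label_distribution labels all_category (get_label_distribution labels all_category)

-- ===== LEMMAS AND PROOFS =====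

-- the number of rows with a 1 in column i (proof-side characterisation of B's index dict)
def pvColCount (rows : List (List Int)) (i : Int) : Int :=
  ((rows.filter (fun r => decide (i < (r.length : Int)) && (PySem.List.pyGetD r i 0 == 1))).length : Int)

-- contribution of one row to key k, as A's inner loop counts it
def pvRowCnt (all_category : List String) (l : List Int) (k : String) : Int :=
  (((PySem.List.enumerate l).filter
      (fun p => p.2 == 1 && (PySem.List.pyGetD all_category p.1 "" == k))).length : Int)

-- A's inner enumerate loop: keys unchanged, each key's count grows by that key's row count
theorem pv_inner_loop (all_category : List String) (ps : List (Int × Int)) :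
    ∀ (d : PySem.Dict String Int),
      (∀ p ∈ ps, p.2 = 1 → PySem.List.pyGetD all_category p.1 "" ∈ d.keys) →
      (ps.foldl (fun d p =>
          if p.2 == 1 then
            d.insert (PySem.List.pyGetD all_category p.1 "")
              (d.getD (PySem.List.pyGetD all_category p.1 "") 0 + 1)
          else d) d).keys = d.keys ∧
      ∀ k, (ps.foldl (fun d p =>
          if p.2 == 1 then
            d.insert (PySem.List.pyGetD all_category p.1 "")
              (d.getD (PySem.List.pyGetD all_category p.1 "") 0 + 1)
          else d) d).getD k 0
        = d.getD k 0 + ((ps.filter (fun p => p.2 == 1 && (PySem.List.pyGetD all_category p.1 "" == k))).length : Int) := by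
  induction ps with
  | nil => intro d _; simp
  | cons p ps ih =>
    intro d hmem
    by_cases h1 : p.2 = 1
    · have hck : PySem.List.pyGetD all_category p.1 "" ∈ d.keys := hmem p (by simp) h1
      have hcon : d.contains (PySem.List.pyGetD all_category p.1 "") = true :=
        (PySem.Dict.contains_iff_mem_keys d _).2 hck
      have hkeys : (d.insert (PySem.List.pyGetD all_category p.1 "")
          (d.getD (PySem.List.pyGetD all_category p.1 "") 0 + 1)).keys = d.keys :=
        PySem.Dict.keys_insert_of_contains d _ hcon
      have ih' := ih (d.insert (PySem.List.pyGetD all_category p.1 "")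
          (d.getD (PySem.List.pyGetD all_category p.1 "") 0 + 1))
        (fun q hq hq1 => by rw [hkeys]; exact hmem q (List.mem_cons_of_mem _ hq) hq1)
      simp only [List.foldl_cons, h1, beq_self_eq_true, if_true]
      refine ⟨by rw [ih'.1, hkeys], fun k => ?_⟩
      rw [ih'.2 k, PySem.Dict.getD_insert]
      by_cases hkc : k = PySem.List.pyGetD all_category p.1 ""
      · rw [if_pos hkc]
        have hpred : (p.2 == 1 && (PySem.List.pyGetD all_category p.1 "" == k)) = true := by
          simp [h1, hkc]
        rw [List.filter_cons, if_pos hpred, hkc]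
        rw [List.length_cons]; push_cast; ring
      · rw [if_neg hkc]
        have hpred : (p.2 == 1 && (PySem.List.pyGetD all_category p.1 "" == k)) = false := by
          rw [Bool.and_eq_false_iff]
          right
          rw [beq_eq_false_iff_ne]
          exact fun h => hkc h.symm
        rw [List.filter_cons, if_neg (by simp [hpred])]
    · have h1' : (p.2 == 1) = false := by simp [h1]
      simp only [List.foldl_cons, h1', Bool.false_eq_true, if_false]
      have ih' := ih d (fun q hq hq1 => hmem q (List.mem_cons_of_mem _ hq) hq1)
      refine ⟨ih'.1, fun k => ?_⟩
      rw [ih'.2 k, List.filter_cons, if_neg (by simp [h1'])]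

-- A's outer row loop: keys unchanged, counts grow by the unknown tally plus per-row counts
theorem pv_outer_loop (all_category : List String) (labels : List (List Int)) :
    ∀ (d : PySem.Dict String Int),
      (∀ c ∈ all_category, c ∈ d.keys) → "unknown" ∈ d.keys →
      (∀ l ∈ labels, l.sum ≠ 0 → ∀ i : Nat, i < l.length → l.getD i 0 = 1 → i < all_category.length) →
      (labels.foldl (pvRowStep all_category) d).keys = d.keys ∧
      ∀ k, (labels.foldl (pvRowStep all_category) d).getD k 0
        = d.getD k 0
          + (if k = "unknown" then (((labels.filter (fun l => l.sum == 0)).length : Int)) else 0)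
          + ((labels.filter (fun l => !(l.sum == 0))).map (fun l => pvRowCnt all_category l k)).sum := by
  induction labels with
  | nil => intro d _ _ _; simp
  | cons l labels ih =>
    intro d hmemc hmemu hpre
    by_cases h0 : l.sum = 0
    · have h0' : (l.sum == 0) = true := by simp [h0]
      have hcon : d.contains "unknown" = true := (PySem.Dict.contains_iff_mem_keys d _).2 hmemu
      have hkeys : (d.insert "unknown" (d.getD "unknown" 0 + 1)).keys = d.keys :=
        PySem.Dict.keys_insert_of_contains d _ hcon
      have ih' := ih (d.insert "unknown" (d.getD "unknown" 0 + 1))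
        (fun c hc => by rw [hkeys]; exact hmemc c hc) (by rw [hkeys]; exact hmemu)
        (fun l' hl' => hpre l' (List.mem_cons_of_mem _ hl'))
      simp only [List.foldl_cons, pvRowStep, h0', if_true]
      refine ⟨by rw [ih'.1, hkeys], fun k => ?_⟩
      rw [ih'.2 k, PySem.Dict.getD_insert]
      simp only [List.filter_cons, h0', Bool.not_true, Bool.false_eq_true, if_false, if_true,
        List.length_cons]
      split_ifs with hk
      · subst hk; push_cast; ring
      · ring
    · have h0' : (l.sum == 0) = false := by simp [h0]
      have hinner := pv_inner_loop all_category (PySem.List.enumerate l) d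
        (fun p hp hp1 => by
          rw [PySem.List.mem_enumerate_iff] at hp
          obtain ⟨j, hj, rfl⟩ := hp
          have hgd : l.getD j 0 = 1 := by rw [List.getD_eq_getElem l 0 hj]; exact hp1
          have hjlt : j < all_category.length := hpre l (by simp) h0 j hj hgd
          have : PySem.List.pyGetD all_category (0 + (j : Int)) "" = all_category[j] := by
            rw [PySem.List.pyGetD_eq_getElem all_category "" (by omega) (by push_cast; omega)]
            congr 1
            omega
          rw [this]
          exact hmemc _ (List.getElem_mem hjlt))
      set dn := (PySem.List.enumerate l).foldl (fun d p =>
          if p.2 == 1 then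
            d.insert (PySem.List.pyGetD all_category p.1 "")
              (d.getD (PySem.List.pyGetD all_category p.1 "") 0 + 1)
          else d) d with hdn
      have ih' := ih dn
        (fun c hc => by rw [hinner.1]; exact hmemc c hc) (by rw [hinner.1]; exact hmemu)
        (fun l' hl' => hpre l' (List.mem_cons_of_mem _ hl'))
      simp only [List.foldl_cons, pvRowStep, h0', Bool.false_eq_true, if_false]
      rw [← hdn]
      refine ⟨by rw [ih'.1, hinner.1], fun k => ?_⟩
      rw [ih'.2 k, hinner.2 k]
      simp only [List.filter_cons, h0', Bool.not_false, Bool.false_eq_true, if_false, if_true,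
        List.map_cons, List.sum_cons]
      show _ = _ + _ + (pvRowCnt all_category l k + _)
      rw [pvRowCnt]
      ring

-- B's category loop: keys unchanged, each key's count grows by its columns' values
theorem pv_col_loop (v : Int → Int) (ps : List (Int × String)) :
    ∀ (d : PySem.Dict String Int),
      (∀ p ∈ ps, p.2 ∈ d.keys) →
      (ps.foldl (fun d p => d.insert p.2 (d.getD p.2 0 + v p.1)) d).keys = d.keys ∧
      ∀ k, (ps.foldl (fun d p => d.insert p.2 (d.getD p.2 0 + v p.1)) d).getD k 0
        = d.getD k 0 + ((ps.map (fun p => if p.2 = k then v p.1 else 0)).sum) := by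
  induction ps with
  | nil => intro d _; simp
  | cons p ps ih =>
    intro d hmem
    have hcon : d.contains p.2 = true :=
      (PySem.Dict.contains_iff_mem_keys d _).2 (hmem p (by simp))
    have hkeys : (d.insert p.2 (d.getD p.2 0 + v p.1)).keys = d.keys :=
      PySem.Dict.keys_insert_of_contains d _ hcon
    have ih' := ih (d.insert p.2 (d.getD p.2 0 + v p.1))
      (fun q hq => by rw [hkeys]; exact hmem q (List.mem_cons_of_mem _ hq))
    simp only [List.foldl_cons, List.map_cons, List.sum_cons]
    refine ⟨by rw [ih'.1, hkeys], fun k => ?_⟩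
    rw [ih'.2 k, PySem.Dict.getD_insert]
    by_cases hkc : k = p.2
    · rw [if_pos hkc, if_pos hkc.symm, hkc]; ring
    · rw [if_neg hkc, if_neg (fun h => hkc h.symm)]; ring

-- one row's count at key k, re-read along the columns of all_category
theorem pv_single_row (all_category : List String) (k : String) (r : List Int)
    (hpre : ∀ i : Nat, i < r.length → r.getD i 0 = 1 → i < all_category.length) :
    pvRowCnt all_category r k
      = ((PySem.List.enumerate all_category).map
          (fun p => if (p.2 == k && (decide (p.1 < (r.length : Int)) && (PySem.List.pyGetD r p.1 0 == 1))) then (1 : Int) else 0)).sum := by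
  rw [pvRowCnt, PySem.List.enumerate_eq_map_pyRange r 0, PySem.List.enumerate_eq_map_pyRange all_category ""]
  rw [List.filter_map, List.length_map, List.map_map]
  rw [← List.countP_eq_length_filter]
  have hsum := PySem.List.sum_map_ite_one_zero
    (fun j : Int => (PySem.List.pyGetD all_category j "" == k && (decide (j < (r.length : Int)) && (PySem.List.pyGetD r j 0 == 1))))
    (PySem.List.pyRange 0 (PySem.List.len all_category))
  rw [show ((fun p : Int × String => if (p.2 == k && (decide (p.1 < (r.length : Int)) && (PySem.List.pyGetD r p.1 0 == 1))) then (1 : Int) else 0) ∘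
      (fun j : Int => (j, PySem.List.pyGetD all_category j "")))
    = (fun j : Int => if (PySem.List.pyGetD all_category j "" == k && (decide (j < (r.length : Int)) && (PySem.List.pyGetD r j 0 == 1))) then (1 : Int) else 0) from rfl]
  rw [hsum]
  congr 1
  -- a pure counting statement over index ranges
  have hlr : PySem.List.len r = (r.length : Int) := rfl
  have hla : PySem.List.len all_category = (all_category.length : Int) := rfl
  set nr : Int := (r.length : Int) with hnr
  set na : Int := (all_category.length : Int) with hna
  set N : Int := max nr na with hN
  rw [show PySem.List.len r = nr from rfl, show PySem.List.len all_category = na from rfl]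
  have hout_r : ∀ j : Int, nr ≤ j → (PySem.List.pyGetD r j 0 == 1) = false := by
    intro j hj
    have h0j : (0:Int) ≤ j := le_trans (by positivity) hj
    rw [PySem.List.pyGetD_of_nonneg r 0 h0j, List.getD_eq_default r 0 (by omega)]
    decide
  have hP : List.countP
      ((fun p => p.2 == 1 && PySem.List.pyGetD all_category p.1 "" == k) ∘ fun j => (j, PySem.List.pyGetD r j 0))
      (PySem.List.pyRange 0 nr)
    = List.countP
      ((fun p => p.2 == 1 && PySem.List.pyGetD all_category p.1 "" == k) ∘ fun j => (j, PySem.List.pyGetD r j 0))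
      (PySem.List.pyRange 0 N) := by
    rw [PySem.List.pyRange_one_append 0 nr N (by positivity) (le_max_left _ _), List.countP_append]
    have hz : List.countP
        ((fun p => p.2 == 1 && PySem.List.pyGetD all_category p.1 "" == k) ∘ fun j => (j, PySem.List.pyGetD r j 0))
        (PySem.List.pyRange nr N) = 0 := by
      rw [List.countP_eq_zero]
      intro j hj
      have hj' := PySem.List.mem_pyRange_one.1 hj
      simp [Function.comp, hout_r j hj'.1]
    omega
  have hQ : List.countP
      (fun j => PySem.List.pyGetD all_category j "" == k && (decide (j < (r.length:Int)) && PySem.List.pyGetD r j 0 == 1))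
      (PySem.List.pyRange 0 na)
    = List.countP
      (fun j => PySem.List.pyGetD all_category j "" == k && (decide (j < (r.length:Int)) && PySem.List.pyGetD r j 0 == 1))
      (PySem.List.pyRange 0 N) := by
    rw [PySem.List.pyRange_one_append 0 na N (by positivity) (le_max_right _ _), List.countP_append]
    have hz : List.countP
        (fun j => PySem.List.pyGetD all_category j "" == k && (decide (j < (r.length:Int)) && PySem.List.pyGetD r j 0 == 1))
        (PySem.List.pyRange na N) = 0 := by
      rw [List.countP_eq_zero]
      intro j hj
      have hj' := PySem.List.mem_pyRange_one.1 hj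
      have h0j : (0:Int) ≤ j := le_trans (by positivity) hj'.1
      intro hq
      simp only [Bool.and_eq_true, decide_eq_true_eq, beq_iff_eq] at hq
      obtain ⟨-, hjr, h1⟩ := hq
      rw [PySem.List.pyGetD_of_nonneg r 0 h0j] at h1
      have := hpre j.toNat (by omega) h1
      omega
    omega
  rw [hP, hQ]
  apply List.countP_congr
  intro j hj
  have hj' := PySem.List.mem_pyRange_one.1 hj
  by_cases hr : j < nr
  · simp only [Function.comp]
    cases hb : (PySem.List.pyGetD r j 0 == 1) <;>
      cases hb2 : (PySem.List.pyGetD all_category j "" == k) <;>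
        simp [hb, hb2, show j < (r.length:Int) from hr]
  · simp only [Function.comp]
    simp [hout_r j (by omega), hr]

theorem pv_colcount_cons (r : List Int) (rows : List (List Int)) (i : Int) :
    pvColCount (r :: rows) i
      = (if (decide (i < (r.length : Int)) && (PySem.List.pyGetD r i 0 == 1)) then (1:Int) else 0)
        + pvColCount rows i := by
  rw [pvColCount, List.filter_cons]
  by_cases h : (decide (i < (r.length : Int)) && (PySem.List.pyGetD r i 0 == 1)) = true
  · rw [if_pos h, if_pos h, List.length_cons, pvColCount]; push_cast; ring
  · rw [if_neg h, if_neg h, pvColCount]; ring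

-- at most one 1-entry of a row sits in column i
theorem pv_row_once (l : List Int) (i : Int) (h0 : 0 ≤ i) :
    (((PySem.List.enumerate l).filter (fun p => p.2 == 1 && p.1 == i)).length : Int)
      = if (decide (i < (l.length : Int)) && (PySem.List.pyGetD l i 0 == 1)) then 1 else 0 := by
  rw [PySem.List.enumerate_eq_map_pyRange l 0, List.filter_map, List.length_map,
    ← List.countP_eq_length_filter]
  rw [show ((fun p : Int × Int => p.2 == 1 && p.1 == i) ∘ (fun j : Int => (j, PySem.List.pyGetD l j 0)))
      = (fun j : Int => (PySem.List.pyGetD l j 0 == 1) && (j == i)) from rfl]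
  have hcnt : List.countP (fun j : Int => (PySem.List.pyGetD l j 0 == 1) && (j == i))
      (PySem.List.pyRange 0 (PySem.List.len l))
      = List.count i ((PySem.List.pyRange 0 (PySem.List.len l)).filter
          (fun j => PySem.List.pyGetD l j 0 == 1)) := by
    rw [List.count_eq_countP, List.countP_filter]
    apply List.countP_congr
    intro j _
    cases h1 : (PySem.List.pyGetD l j 0 == 1) <;> cases h2 : (j == i) <;> simp [h1, h2, eq_comm]
  rw [hcnt]
  by_cases hq : (PySem.List.pyGetD l i 0 == 1) = true
  · by_cases hm : i < (l.length : Int)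
    · rw [List.count_filter (p := fun j => PySem.List.pyGetD l j 0 == 1) (a := i) hq]
      have hmem : i ∈ PySem.List.pyRange 0 (PySem.List.len l) :=
        PySem.List.mem_pyRange_one.2 ⟨h0, hm⟩
      rw [List.count_eq_one_of_mem (PySem.List.nodup_pyRange_one _ _) hmem]
      simp [hm, hq]
    · have : List.count i ((PySem.List.pyRange 0 (PySem.List.len l)).filter
          (fun j => PySem.List.pyGetD l j 0 == 1)) = 0 := by
        rw [List.count_eq_zero]
        intro hmem
        exact hm (PySem.List.mem_pyRange_one.1 (List.mem_of_mem_filter hmem)).2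
      rw [this]
      simp [hm]
  · have : List.count i ((PySem.List.pyRange 0 (PySem.List.len l)).filter
        (fun j => PySem.List.pyGetD l j 0 == 1)) = 0 := by
      rw [List.count_eq_zero]
      intro hmem
      exact hq (List.of_mem_filter (p := fun j => PySem.List.pyGetD l j 0 == 1) hmem)
    rw [this]
    simp [hq]

-- B's inner index loop: key i's count grows by the number of 1-entries at index i
theorem pv_idx_loop (ps : List (Int × Int)) :
    ∀ (d : PySem.Dict Int Int) (i : Int),
      (ps.foldl (fun d p => if p.2 == 1 then d.insert p.1 (d.getD p.1 0 + 1) else d) d).getD i 0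
        = d.getD i 0 + ((ps.filter (fun p => p.2 == 1 && p.1 == i)).length : Int) := by
  induction ps with
  | nil => intro d i; simp
  | cons p ps ih =>
    intro d i
    by_cases h1 : p.2 = 1
    · simp only [List.foldl_cons, h1, beq_self_eq_true, if_true]
      rw [ih, PySem.Dict.getD_insert]
      by_cases hki : i = p.1
      · have hpred : (p.2 == 1 && (p.1 == i)) = true := by simp [h1, hki.symm]
        rw [if_pos hki, List.filter_cons, if_pos hpred, List.length_cons, hki]
        push_cast; ring
      · have hpred : (p.2 == 1 && (p.1 == i)) = false := by
          rw [Bool.and_eq_false_iff]; right; rw [beq_eq_false_iff_ne]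
          exact fun h => hki h.symm
        rw [if_neg hki, List.filter_cons, if_neg (by simp [hpred])]
    · have h1' : (p.2 == 1) = false := by simp [h1]
      simp only [List.foldl_cons, h1', Bool.false_eq_true, if_false]
      rw [ih, List.filter_cons, if_neg (by simp [h1'])]

-- B's per-index counting dict evaluates to the column count
theorem pv_col_getD (rows : List (List Int)) :
    ∀ (d : PySem.Dict Int Int) (i : Int), 0 ≤ i →
      (rows.foldl (fun d l => (PySem.List.enumerate l).foldl
          (fun d p => if p.2 == 1 then d.insert p.1 (d.getD p.1 0 + 1) else d) d) d).getD i 0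
        = d.getD i 0 + pvColCount rows i := by
  induction rows with
  | nil => intro d i _; simp [pvColCount]
  | cons r rows ih =>
    intro d i h0
    simp only [List.foldl_cons]
    rw [ih _ i h0, pv_idx_loop, pv_row_once r i h0, pv_colcount_cons]
    ring

-- the interchange: summing row by row equals summing column by column
theorem pv_interchange (all_category : List String) (k : String) (rows : List (List Int))
    (hpre : ∀ r ∈ rows, ∀ i : Nat, i < r.length → r.getD i 0 = 1 → i < all_category.length) :
    (rows.map (fun l => pvRowCnt all_category l k)).sum
      = ((PySem.List.enumerate all_category).map
          (fun p => if p.2 = k then pvColCount rows p.1 else 0)).sum := by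
  induction rows with
  | nil => simp [pvColCount]
  | cons r rows ih =>
    have hsplit : ∀ p ∈ PySem.List.enumerate all_category,
        (if p.2 = k then pvColCount (r :: rows) p.1 else 0)
          = (if (p.2 == k && (decide (p.1 < (r.length : Int)) && (PySem.List.pyGetD r p.1 0 == 1))) then (1:Int) else 0)
            + (if p.2 = k then pvColCount rows p.1 else 0) := by
      intro p _
      by_cases hpk : p.2 = k
      · rw [if_pos hpk, if_pos hpk, pv_colcount_cons]
        have : (p.2 == k) = true := by simp [hpk]
        rw [this, Bool.true_and]
      · rw [if_neg hpk, if_neg hpk]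
        have : (p.2 == k) = false := by simp [hpk]
        rw [this, Bool.false_and, if_neg (by simp)]
        ring
    rw [List.map_congr_left hsplit, PySem.List.sum_map_add_int]
    rw [List.map_cons, List.sum_cons]
    rw [ih (fun r' hr' => hpre r' (List.mem_cons_of_mem _ hr'))]
    rw [pv_single_row all_category k r (hpre r (by simp))]

-- ===== VERDICT (by name: the statement is the Claim_ definition above) =====
theorem get_label_distribution_spec : Claim_equal_get_label_distribution := by
  intro labels all_category _ hpre
  unfold Spec_get_label_distribution
  rw [get_label_distribution, get_label_distribution_alt]
  set d0 : PySem.Dict String Int :=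
    all_category.foldl (fun d k => d.insert k 0) PySem.Dict.empty with hd0
  have hnd0 : d0.keys.Nodup :=
    PySem.Dict.nodup_keys_foldl_insert all_category (fun _ _ => 0) PySem.Dict.empty
      PySem.Dict.nodup_keys_empty
  have hk0 : d0.keys = PySem.Set.update (PySem.Dict.empty (κ := String) (ν := Int)).keys all_category :=
    PySem.Dict.keys_foldl_insert all_category (fun _ _ => 0) PySem.Dict.empty
  have hmem0 : ∀ c ∈ all_category, c ∈ d0.keys := by
    intro c hc
    rw [hk0]
    exact (PySem.Set.mem_update _ _ _).2 (Or.inr hc)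
  set uc : Int := (((labels.filter (fun l => l.sum == 0)).length : Int)) with huc
  set d1A := d0.insert "unknown" 0 with hd1A
  set d1B := d0.insert "unknown" uc with hd1B
  have hkeys1 : d1A.keys = d1B.keys := by
    by_cases h : d0.contains "unknown" = true
    · rw [hd1A, hd1B, PySem.Dict.keys_insert_of_contains d0 _ h,
        PySem.Dict.keys_insert_of_contains d0 _ h]
    · rw [hd1A, hd1B,
        PySem.Dict.keys_insert_of_not_contains d0 _ (by simpa using h),
        PySem.Dict.keys_insert_of_not_contains d0 _ (by simpa using h)]
  have hmemA : ∀ c ∈ all_category, c ∈ d1A.keys :=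
    fun c hc => (PySem.Dict.mem_keys_insert d0 _ _ _).2 (Or.inr (hmem0 c hc))
  have hmemuA : "unknown" ∈ d1A.keys := (PySem.Dict.mem_keys_insert d0 _ _ _).2 (Or.inl rfl)
  have hndA : d1A.keys.Nodup := PySem.Dict.nodup_keys_insert d0 _ _ hnd0
  have hA := pv_outer_loop all_category labels d1A hmemA hmemuA hpre
  have hmemB : ∀ p ∈ PySem.List.enumerate all_category, p.2 ∈ d1B.keys := by
    intro p hp
    rw [PySem.List.mem_enumerate_iff] at hp
    obtain ⟨j, hj, rfl⟩ := hp
    rw [← hkeys1]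
    exact hmemA _ (List.getElem_mem hj)
  set rows := labels.filter (fun l => !(l.sum == 0)) with hrows
  set col : PySem.Dict Int Int := rows.foldl (fun d l => (PySem.List.enumerate l).foldl
      (fun d p => if p.2 == 1 then d.insert p.1 (d.getD p.1 0 + 1) else d) d) PySem.Dict.empty
    with hcol
  have hB := pv_col_loop (fun i => col.getD i 0)
    (PySem.List.enumerate all_category) d1B hmemB
  have hcolv : ∀ p ∈ PySem.List.enumerate all_category, ∀ k : String,
      (if p.2 = k then col.getD p.1 0 else 0) = (if p.2 = k then pvColCount rows p.1 else 0) := by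
    intro p hp k
    rw [PySem.List.mem_enumerate_iff] at hp
    obtain ⟨j, hj, rfl⟩ := hp
    rw [hcol, pv_col_getD rows PySem.Dict.empty _ (by omega)]
    simp
  have hdeq : labels.foldl (pvRowStep all_category) d1A
      = (PySem.List.enumerate all_category).foldl
          (fun d p => d.insert p.2 (d.getD p.2 0 + col.getD p.1 0)) d1B := by
    apply PySem.Dict.ext
    have hndA2 : (labels.foldl (pvRowStep all_category) d1A).keys.Nodup := by
      rw [hA.1]; exact hndA
    have hndB2 : ((PySem.List.enumerate all_category).foldl
        (fun d p => d.insert p.2 (d.getD p.2 0 + col.getD p.1 0)) d1B).keys.Nodup := by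
      rw [hB.1, ← hkeys1]; exact hndA
    rw [PySem.Dict.items_eq_map_keys _ hndA2 0, PySem.Dict.items_eq_map_keys _ hndB2 0]
    rw [hA.1, hB.1, hkeys1]
    apply List.map_congr_left
    intro k _
    congr 1
    rw [hA.2 k, hB.2 k]
    rw [List.map_congr_left (fun p hp => hcolv p hp k)]
    have hinter := pv_interchange all_category k rows
      (fun r hr => by
        rw [hrows, List.mem_filter] at hr
        exact hpre r hr.1 (by simpa using hr.2))
    rw [← hinter, hrows]
    rw [hd1A, hd1B, PySem.Dict.getD_insert, PySem.Dict.getD_insert]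
    split_ifs with hk
    · ring
    · ring
  rw [hdeq]
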